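-- pv_equiv track=rewrite | github.com/HBinhCT/Q-project | hackerearth/Data Structures/Trees/Heaps,Priority Queues/Mode of an array/solution.py | make_mode
-- ===== SOURCE A (Python) =====
-- from collections import Counter
--
-- def make_mode(mode, arr):
--     frequencies = Counter(arr)
--     if len(frequencies) == 1:
--         num = next(iter(frequencies))
--         if mode == num:
--             return 0
--         else:
--             return frequencies[num] // 2 + 1
--     original_mode_fre = frequencies[mode]
--     counter_frequencies = Counter(frequencies.values())
--     list_counter = sorted(counter_frequencies.items(), reverse=True)
--     list_counter.append((0, 0))
--     if len(counter_frequencies) == 1: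
--         fre, count = list_counter[0]
--         if fre == original_mode_fre:
--             return 1 - (count == 1)
--         else:
--             return fre + 1 - fre // count
--     mode_fre = frequencies[mode]
--     total = 0
--     for i in range(len(list_counter) - 1):
--         fre, count = list_counter[i]
--         next_fre, next_cnt = list_counter[i + 1]
--         total += count
--         if mode_fre == fre and total == 1:
--             return 0
--         next_mode_fre = (fre - next_fre) * total + mode_fre
--         if next_mode_fre > next_fre:
--             low = next_fre
--             high = next_mode_fre
--             while low < high:
--                 mid = (low + high) // 2
--                 quotient, remainder = divmod(next_mode_fre - mid, total)
--                 if mid > next_fre + quotient + (remainder > 0):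
--                     high = mid
--                 else:
--                     low = mid + 1
--             return high - original_mode_fre
--         else:
--             mode_fre = next_mode_fre
-- ===== SOURCE B (Python) =====
-- from collections import Counter
--
-- # Same frequency-level analysis as A, but the per-level answer is computed by a
-- # closed-form ceiling division instead of A's inner binary search, and the
-- # running mode frequency is carried as prefix sums (t = values seen, s = sum of
-- # their frequencies) instead of A's recursive update over a sentinel-padded list.
-- def make_mode(mode, arr):
--     frequencies = Counter(arr)
--     if len(frequencies) == 1:
--         # a single distinct value: its count is len(arr)
--         return 0 if mode in frequencies else len(arr) // 2 + 1
--     fmode = frequencies[mode]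
--     levels = sorted(Counter(frequencies.values()).items(), reverse=True)
--     if len(levels) == 1:
--         f, c = levels[0]
--         if f == fmode:
--             return 0 if c == 1 else 1
--         return f + 1 - f // c
--     if fmode == levels[0][0] and levels[0][1] == 1:
--         return 0
--     t = 0
--     s = 0
--     for i, (f, c) in enumerate(levels):
--         t += c
--         s += c * f
--         nxt = levels[i + 1][0] if i + 1 < len(levels) else 0
--         n = fmode + s - t * nxt
--         if n > nxt:
--             return (n + t * nxt + 2 * t) // (t + 1) - fmode
--     return 0  # unreachable for non-empty arr
-- ===== Notes on version B (the rewrite author's own statement) =====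
-- stated objective: simpler
-- what changed: B replaces A's inner binary search with a closed-form ceiling division, carries the growing mode frequency as prefix sums (count t and frequency-sum s) instead of A's recursive per-level update, drops the (0,0) sentinel, and hoists the 'already the unique mode' check out of the loop; the single-distinct-value branch uses membership and len(arr) instead of extracting the only key.
-- outside the precondition, e.g. on make_mode(3, []): A returns None, B raises IndexError
import Mathlib
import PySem

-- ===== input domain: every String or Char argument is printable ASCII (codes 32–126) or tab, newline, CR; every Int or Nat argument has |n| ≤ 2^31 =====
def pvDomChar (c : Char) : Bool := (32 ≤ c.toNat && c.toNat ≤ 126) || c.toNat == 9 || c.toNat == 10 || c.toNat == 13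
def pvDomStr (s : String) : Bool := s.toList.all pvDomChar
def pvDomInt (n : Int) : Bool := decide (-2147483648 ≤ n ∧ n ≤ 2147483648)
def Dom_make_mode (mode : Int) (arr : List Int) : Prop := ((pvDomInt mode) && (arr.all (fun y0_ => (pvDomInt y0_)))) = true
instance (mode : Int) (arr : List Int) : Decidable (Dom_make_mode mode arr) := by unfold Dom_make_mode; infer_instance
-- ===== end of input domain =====

-- B replaces A's inner binary search by a closed-form ceiling division and A's recursive
-- per-level mode-frequency update by prefix sums; equivalence is proved on non-empty arr.

-- ===== PORT A =====
-- the `while low < high` bisection of A, on state (low, high); parameters F = next_fre,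
-- N = next_mode_fre, T = total.  divmod? is none only for T = 0, which A never reaches
-- (counter counts are positive); the 0 there is an arbitrary total-ization.
def bsA (F N T low high : Int) : Int :=
  if h : low < high then
    let mid := PySem.Int.floordiv (low + high) 2
    match PySem.Int.divmod? (N - mid) T with
    | some (q, r) =>
        if F + q + (if 0 < r then (1:Int) else 0) < mid then bsA F N T low mid
        else bsA F N T (mid + 1) high
    | none => 0
  else high
termination_by (high - low).toNat
decreasing_by
  · have hb := PySem.Int.floordiv_two_mid_bounds (le_of_lt h) (lo := low) (hi := high)
    have h2 : PySem.Int.floordiv (low + high) 2 < high :=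
      (PySem.Int.floordiv_lt_iff_lt_mul (by omega)).mpr (by omega)
    simp only [mid] at *; omega
  · have hb := PySem.Int.floordiv_two_mid_bounds (le_of_lt h) (lo := low) (hi := high)
    have h2 : PySem.Int.floordiv (low + high) 2 < high :=
      (PySem.Int.floordiv_lt_iff_lt_mul (by omega)).mpr (by omega)
    simp only [mid] at *; omega

-- A's `for i in range(len(list_counter) - 1)` loop on the sentinel-padded list,
-- state (mode_fre, total); none = the loop falls through (Python returns None).
def loopA : List (Int × Int) → Int → Int → Int → Option Int
  | (f, c) :: (nf, nc) :: rest, mode_fre, total, orig =>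
      let total' := total + c
      if mode_fre = f ∧ total' = 1 then some 0
      else
        let nmf := (f - nf) * total' + mode_fre
        if nf < nmf then some (bsA nf nmf total' nf nmf - orig)
        else loopA ((nf, nc) :: rest) nmf total' orig
  | _, _, _, _ => none

def make_mode (mode : Int) (arr : List Int) : Int :=
  let frequencies := PySem.Dict.counter arr
  if frequencies.size = 1 then
    let num := frequencies.keys.headD 0            -- next(iter(frequencies)); keys ≠ [] here
    if mode = num then 0
    else PySem.Int.floordiv (frequencies.getD num 0) 2 + 1
  else
    let original_mode_fre := frequencies.getD mode 0
    let counter_frequencies := PySem.Dict.counter frequencies.values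
    let list_counter :=
      PySem.List.sorted2 counter_frequencies.items (·.1) (·.2) true ++ [((0:Int), (0:Int))]
    if counter_frequencies.size = 1 then
      let p := list_counter.headD (0, 0)           -- list_counter[0]; list ≠ []
      if p.1 = original_mode_fre then 1 - (if p.2 = 1 then (1:Int) else 0)
      else p.1 + 1 - PySem.Int.floordiv p.1 p.2
    else
      let mode_fre := frequencies.getD mode 0
      (loopA list_counter mode_fre 0 original_mode_fre).getD 0

-- ===== PORT B =====
-- B's `for i, (f, c) in enumerate(levels)` loop; state (t, s) = prefix count / frequency sum;
-- nxt = levels[i+1][0] (the head of the remaining list) or 0 past the end.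
def loopB : List (Int × Int) → Int → Int → Int → Option Int
  | [], _, _, _ => none
  | (f, c) :: rest, t, s, fmode =>
      let t' := t + c
      let s' := s + c * f
      let nxt := match rest with | [] => (0:Int) | (nf, _) :: _ => nf
      let n := fmode + s' - t' * nxt
      if nxt < n then some (PySem.Int.floordiv (n + t' * nxt + 2 * t') (t' + 1) - fmode)
      else loopB rest t' s' fmode

def make_mode_alt (mode : Int) (arr : List Int) : Int :=
  let frequencies := PySem.Dict.counter arr
  if frequencies.size = 1 then
    if frequencies.contains mode then 0
    else PySem.Int.floordiv (arr.length : Int) 2 + 1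
  else
    let fmode := frequencies.getD mode 0
    let levels := PySem.List.sorted2 (PySem.Dict.counter frequencies.values).items (·.1) (·.2) true
    if levels.length = 1 then
      let p := levels.headD (0, 0)
      if p.1 = fmode then (if p.2 = 1 then 0 else 1)
      else p.1 + 1 - PySem.Int.floordiv p.1 p.2
    else
      if fmode = (levels.headD (0, 0)).1 ∧ (levels.headD (0, 0)).2 = 1 then 0
      else (loopB levels 0 0 fmode).getD 0

-- ===== PRECONDITION & SPEC =====
-- Pre_ excludes only arr = [], where the Python A falls off the end and returns None (no int).
def Pre_make_mode (mode : Int) (arr : List Int) : Prop := arr ≠ []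
instance (mode : Int) (arr : List Int) : Decidable (Pre_make_mode mode arr) := by
  unfold Pre_make_mode; infer_instance
def pvWitness_make_mode : Int × List Int := (1, [1, 2, 2])

def Spec_make_mode (mode : Int) (arr : List Int) (out : Int) : Prop := out = make_mode_alt mode arr
instance (mode : Int) (arr : List Int) (out : Int) : Decidable (Spec_make_mode mode arr out) := by
  unfold Spec_make_mode; infer_instance

-- ===== CLAIM (what is proved, stated in full; the proofs are below) =====
def Claim_equal_make_mode : Prop := ∀ (mode : Int) (arr : List Int), Dom_make_mode mode arr → Pre_make_mode mode arr → Spec_make_mode mode arr (make_mode mode arr)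

-- ===== LEMMAS AND PROOFS =====


-- closed-form target of the bisection: ceil((N + T*F + T)/(T+1)) written as a floor division
def bsC (F N T : Int) : Int := PySem.Int.floordiv (N + T * F + 2 * T) (T + 1)

theorem divmod_some (a b : Int) (h : b ≠ 0) :
    PySem.Int.divmod? a b = some (PySem.Int.floordiv a b, PySem.Int.mod a b) := by
  simp [PySem.Int.divmod?, h, PySem.Int.floordiv, PySem.Int.mod]

-- the bisection's branch test is exactly "the closed-form answer is ≤ mid"
theorem bsA_step_iff (F N T mid : Int) (hT : 1 ≤ T) :
    (F + PySem.Int.floordiv (N - mid) T +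
        (if 0 < PySem.Int.mod (N - mid) T then (1:Int) else 0) < mid)
      ↔ bsC F N T ≤ mid := by
  have hq := PySem.Int.floordiv_mul_add_mod (N - mid) T
  have hr0 := PySem.Int.mod_nonneg (N - mid) (by omega : (0:Int) < T)
  have hrT := PySem.Int.mod_lt (N - mid) (by omega : (0:Int) < T)
  set q := PySem.Int.floordiv (N - mid) T with hqdef
  set r := PySem.Int.mod (N - mid) T with hrdef
  have hc : bsC F N T ≤ mid ↔ bsC F N T < mid + 1 := by omega
  rw [hc, bsC, PySem.Int.floordiv_lt_iff_lt_mul (by omega : (0:Int) < T + 1)]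
  by_cases hr : 0 < r
  · simp only [hr, if_pos]
    constructor
    · intro h; nlinarith
    · intro h; nlinarith
  · have hr' : r = 0 := by omega
    simp only [hr, if_neg, not_false_iff, add_zero]
    constructor
    · intro h; nlinarith
    · intro h; nlinarith

theorem bsA_eq (F N T : Int) (hT : 1 ≤ T) :
    ∀ (k : Nat) (low high : Int), (high - low).toNat ≤ k →
      low ≤ bsC F N T → bsC F N T ≤ high → bsA F N T low high = bsC F N T := by
  intro k
  induction k with
  | zero =>
      intro low high hk h1 h2
      rw [bsA]
      have : ¬ low < high := by omega
      simp only [this, dif_neg, not_false_iff]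
      omega
  | succ k ih =>
      intro low high hk h1 h2
      rw [bsA]
      by_cases hlt : low < high
      · simp only [hlt, dif_pos]
        have hb := PySem.Int.floordiv_two_mid_bounds (le_of_lt hlt) (lo := low) (hi := high)
        have hhi : PySem.Int.floordiv (low + high) 2 < high :=
          (PySem.Int.floordiv_lt_iff_lt_mul (by omega)).mpr (by omega)
        set mid := PySem.Int.floordiv (low + high) 2 with hmid
        rw [divmod_some _ _ (by omega : T ≠ 0)]
        show (if (F + PySem.Int.floordiv (N - mid) T +
            if 0 < PySem.Int.mod (N - mid) T then (1:Int) else 0) < mid then bsA F N T low mid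
          else bsA F N T (mid + 1) high) = bsC F N T
        by_cases hc : bsC F N T ≤ mid
        · rw [if_pos ((bsA_step_iff F N T mid hT).mpr hc)]
          exact ih low mid (by omega) h1 hc
        · rw [if_neg (fun h => hc ((bsA_step_iff F N T mid hT).mp h))]
          exact ih (mid + 1) high (by omega) (by omega) h2
      · simp only [hlt, dif_neg, not_false_iff]
        omega

theorem bsA_closed (F N T : Int) (hT : 1 ≤ T) (hFN : F < N) :
    bsA F N T F N = bsC F N T := by
  have h1 : F + 1 ≤ bsC F N T := by
    rw [bsC, PySem.Int.le_floordiv_iff_mul_le (by omega : (0:Int) < T + 1)]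
    nlinarith
  have h2 : bsC F N T ≤ N := by
    have : bsC F N T < N + 1 := by
      rw [bsC, PySem.Int.floordiv_lt_iff_lt_mul (by omega : (0:Int) < T + 1)]
      nlinarith
    omega
  exact bsA_eq F N T hT (N - F).toNat F N (by omega) (by omega) h2

-- frequency of the head level (0 past the end), the quantity A's mode_fre is measured against
def hd1 : List (Int × Int) → Int
  | [] => 0
  | (f, _) :: _ => f

-- the two loops agree, A's state being mode_fre = fmode + s - t * (current level frequency);
-- at t = 0 (before the first level) B has already discharged A's in-loop "already unique mode" test
theorem loop_eq : ∀ (lv : List (Int × Int)) (fmode t s : Int),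
    (∀ p ∈ lv, 1 ≤ p.2) →
    (1 ≤ t ∨ (t = 0 ∧ s = 0 ∧ ¬ (fmode = hd1 lv ∧ (lv.headD (0, 0)).2 = 1))) →
    loopA (lv ++ [((0:Int), (0:Int))]) (fmode + s - t * hd1 lv) t fmode = loopB lv t s fmode := by
  intro lv
  induction lv with
  | nil => intro fmode t s _ _; rfl
  | cons hd rest ih =>
      intro fmode t s hc hok
      obtain ⟨f, c⟩ := hd
      have hc1 : (1:Int) ≤ c := hc (f, c) (List.mem_cons_self)
      have hcr : ∀ p ∈ rest, (1:Int) ≤ p.2 := fun p hp => hc p (List.mem_cons_of_mem _ hp)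
      have hcond : ¬ ((fmode + s - t * hd1 ((f, c) :: rest)) = f ∧ t + c = 1) := by
        rintro ⟨h1, h2⟩
        rcases hok with ht | ⟨ht0, hs0, hne⟩
        · omega
        · subst ht0; subst hs0
          simp only [hd1] at h1
          simp only [zero_mul, add_zero, sub_zero] at h1
          exact hne ⟨h1, by simpa using (by omega : c = 1)⟩
      match rest with
      | [] =>
          show loopA [(f, c), (0, 0)] _ _ _ = _
          rw [loopA, loopB]
          rw [if_neg hcond]
          simp only [hd1]
          have harg : (f - 0) * (t + c) + (fmode + s - t * f) = fmode + (s + c * f) - (t + c) * 0 := by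
            ring
          rw [harg]
          by_cases hg : (0:Int) < fmode + (s + c * f) - (t + c) * 0
          · rw [if_pos hg, if_pos hg, bsA_closed _ _ _ (by omega) hg, bsC]
          · rw [if_neg hg, if_neg hg]; rfl
      | (nf, nc) :: rest' =>
          show loopA ((f, c) :: (nf, nc) :: (rest' ++ [(0, 0)])) _ _ _ = _
          rw [loopA, loopB]
          rw [if_neg hcond]
          simp only [hd1]
          have harg : (f - nf) * (t + c) + (fmode + s - t * f) = fmode + (s + c * f) - (t + c) * nf := by
            ring
          rw [harg]
          by_cases hg : nf < fmode + (s + c * f) - (t + c) * nf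
          · rw [if_pos hg, if_pos hg, bsA_closed _ _ _ (by omega) hg, bsC]
          · rw [if_neg hg, if_neg hg]
            have := ih fmode (t + c) (s + c * f) hcr (Or.inl (by omega))
            simpa [hd1] using this

-- every count in the sorted level list is positive
theorem levels_counts_pos (xs : List Int) :
    ∀ p ∈ PySem.List.sorted2 (PySem.Dict.counter xs).items (·.1) (·.2) true, (1:Int) ≤ p.2 := by
  intro p hp
  have hmem : p ∈ (PySem.Dict.counter xs).items :=
    (PySem.List.sorted2_perm (PySem.Dict.counter xs).items (·.1) (·.2) true).mem_iff.mp hp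
  rw [PySem.Dict.items_counter] at hmem
  obtain ⟨k, hk, rfl⟩ := List.mem_map.mp hmem
  have : k ∈ xs := (PySem.Set.mem_ofList xs k).mp hk
  have : 0 < xs.count k := List.count_pos_iff.mpr this
  simpa using this

-- arr ≠ [] forces every stage of the pipeline to be non-empty
theorem counter_items_ne_nil {xs : List Int} (h : xs ≠ []) :
    (PySem.Dict.counter xs).items ≠ [] := by
  obtain ⟨x, xs', rfl⟩ := List.exists_cons_of_ne_nil h
  rw [PySem.Dict.items_counter]
  intro hc
  have : x ∈ PySem.Set.ofList (x :: xs') := (PySem.Set.mem_ofList _ x).mpr (List.mem_cons_self)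
  rw [List.map_eq_nil_iff.mp hc] at this
  exact absurd this (List.not_mem_nil)

theorem make_mode_spec : Claim_equal_make_mode := by
  intro mode arr _ hpre
  unfold Pre_make_mode at hpre
  unfold Spec_make_mode make_mode make_mode_alt
  by_cases hsz : (PySem.Dict.counter arr).size = 1
  · -- a single distinct value
    simp only [hsz, if_pos]
    have hlen1 : (PySem.Dict.counter arr).items.length = 1 := hsz
    obtain ⟨p0, hp0⟩ := List.length_eq_one_iff.mp hlen1
    have hkeys : (PySem.Dict.counter arr).keys = [p0.1] := by
      show (PySem.Dict.counter arr).items.map Prod.fst = _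
      rw [hp0]; rfl
    have hset : PySem.Set.ofList arr = [p0.1] := by rw [← PySem.Dict.keys_counter]; exact hkeys
    have hall : ∀ x ∈ arr, x = p0.1 := by
      intro x hx
      have : x ∈ PySem.Set.ofList arr := (PySem.Set.mem_ofList arr x).mpr hx
      rw [hset] at this; simpa using this
    have hmem : p0.1 ∈ arr := by
      obtain ⟨x, xs', rfl⟩ := List.exists_cons_of_ne_nil hpre
      have := hall x (List.mem_cons_self)
      rw [← this]; exact List.mem_cons_self
    have hhead : (PySem.Dict.counter arr).keys.headD 0 = p0.1 := by rw [hkeys]; rfl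
    rw [hhead]
    have hcont : (PySem.Dict.counter arr).contains mode = decide (mode = p0.1) := by
      rw [PySem.Dict.contains_counter]
      by_cases hme : mode = p0.1
      · simp [hme, hmem]
      · simp [hme]
        intro hc
        exact hme (hall mode hc)
    rw [hcont]
    by_cases hme : mode = p0.1
    · simp [hme]
    · simp only [hme, decide_false, if_neg, Bool.false_eq_true, not_false_iff]
      have hcnt : (PySem.Dict.counter arr).getD p0.1 0 = (arr.length : Int) := by
        rw [PySem.Dict.getD_counter]
        congr 1
        exact List.count_eq_length.mpr (fun b hb => (hall b hb).symm)
      rw [hcnt]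
  · -- at least two distinct values
    simp only [hsz, if_neg, not_false_iff]
    set F := PySem.Dict.counter arr with hF
    set levels := PySem.List.sorted2 (PySem.Dict.counter F.values).items (·.1) (·.2) true with hlv
    have hlen : levels.length = (PySem.Dict.counter F.values).size :=
      (PySem.List.sorted2_perm (PySem.Dict.counter F.values).items (·.1) (·.2) true).length_eq
    have hcpos : ∀ p ∈ levels, (1:Int) ≤ p.2 := levels_counts_pos F.values
    by_cases hsz2 : (PySem.Dict.counter F.values).size = 1
    · -- exactly one frequency level
      have hl1 : levels.length = 1 := by rw [hlen]; exact hsz2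
      obtain ⟨q, hq⟩ := List.length_eq_one_iff.mp hl1
      rw [if_pos hsz2, if_pos hl1, hq]
      have hhd : ([q] ++ [((0:Int), (0:Int))]).headD ((0:Int), (0:Int)) = q := rfl
      rw [hhd]
      simp only [List.headD]
      split_ifs <;> omega
    · -- the general loop
      rw [if_neg hsz2, if_neg (by rw [hlen]; exact hsz2)]
      have hvne : F.values ≠ [] := by
        have := counter_items_ne_nil hpre
        show F.items.map Prod.snd ≠ []
        simpa using this
      have hlne : levels ≠ [] := by
        have := counter_items_ne_nil hvne
        intro hc
        rw [hc] at hlen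
        simp only [List.length_nil] at hlen
        exact this (List.length_eq_zero_iff.mp hlen.symm)
      obtain ⟨⟨f0, c0⟩, lrest, hlv0⟩ := List.exists_cons_of_ne_nil hlne
      rw [hlv0]
      by_cases hne : F.getD mode 0 = f0 ∧ c0 = 1
      · -- mode is already the unique mode: both return 0 at once
        have hbc : F.getD mode 0 = (((f0, c0) :: lrest).headD (0, 0)).1 ∧
            (((f0, c0) :: lrest).headD (0, 0)).2 = 1 := by simpa using hne
        rw [if_pos hbc]
        match lrest with
        | [] =>
            show ((loopA [(f0, c0), (0, 0)] _ _ _).getD 0) = 0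
            rw [loopA, if_pos ⟨hne.1, by omega⟩]; rfl
        | (nf, nc) :: l' =>
            show ((loopA ((f0, c0) :: (nf, nc) :: (l' ++ [(0, 0)])) _ _ _).getD 0) = 0
            rw [loopA, if_pos ⟨hne.1, by omega⟩]; rfl
      · have hbc : ¬ (F.getD mode 0 = (((f0, c0) :: lrest).headD (0, 0)).1 ∧
            (((f0, c0) :: lrest).headD (0, 0)).2 = 1) := by simpa using hne
        rw [if_neg hbc]
        have hck : ∀ p ∈ ((f0, c0) :: lrest), (1:Int) ≤ p.2 := by rw [← hlv0]; exact hcpos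
        have := loop_eq ((f0, c0) :: lrest) (F.getD mode 0) 0 0 hck
          (Or.inr ⟨rfl, rfl, by simpa [hd1] using hne⟩)
        simp only [hd1] at this
        have harg : F.getD mode 0 + 0 - 0 * f0 = F.getD mode 0 := by ring
        rw [harg] at this
        rw [this]
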